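-- pv_equiv track=rewrite | github.com/adesupraptolaia/Challange_week1 | Problem 4/2-perkalian-minimum.py | digitPerkalianMinimum
-- ===== SOURCE A (Python) =====
-- def digitPerkalianMinimum(angka):
--     #array tempat pasangan faktor
--     arr_faktor = []
--
--     #looping untuk mencari faktor
--     for i in range(1,angka+1):
--         temp ='' #tempat sementara
--         if angka % i == 0 :
--             temp += str(i)
--             temp += str(int(angka/i))
--             arr_faktor.append(temp)
--
--     hasil = len(arr_faktor[0]) #hasil akhir
--     #membandingkan hasil akhir terkecil
--     for i in range(len(arr_faktor)):
--         if hasil > len(arr_faktor[i]):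
--             hasil = len(arr_faktor[i])
--
--     return hasil
-- ===== SOURCE B (Python) =====
-- def digitPerkalianMinimum(angka):
--     # divisor pairs mirror around sqrt(angka): scan i up to sqrt only
--     best = len(str(1)) + len(str(angka))  # pair (1, angka)
--     i = 2
--     while i * i <= angka:
--         if angka % i == 0:
--             l = len(str(i)) + len(str(angka // i))
--             if l < best:
--                 best = l
--         i += 1
--     return best
-- ===== Notes on version B (the rewrite author's own statement) =====
-- stated objective: faster
-- what changed: B scans candidate divisors only up to sqrt(angka), taking each factor pair from its small member and tracking the running minimum, instead of A's full 1..angka scan that first builds the list of all concatenated factor-pair strings and then takes the minimum length in a second pass.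
-- outside the precondition, e.g. on digitPerkalianMinimum(0): A raises IndexError, B returns 2; on digitPerkalianMinimum(-5): A raises IndexError, B returns 3
import Mathlib
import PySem

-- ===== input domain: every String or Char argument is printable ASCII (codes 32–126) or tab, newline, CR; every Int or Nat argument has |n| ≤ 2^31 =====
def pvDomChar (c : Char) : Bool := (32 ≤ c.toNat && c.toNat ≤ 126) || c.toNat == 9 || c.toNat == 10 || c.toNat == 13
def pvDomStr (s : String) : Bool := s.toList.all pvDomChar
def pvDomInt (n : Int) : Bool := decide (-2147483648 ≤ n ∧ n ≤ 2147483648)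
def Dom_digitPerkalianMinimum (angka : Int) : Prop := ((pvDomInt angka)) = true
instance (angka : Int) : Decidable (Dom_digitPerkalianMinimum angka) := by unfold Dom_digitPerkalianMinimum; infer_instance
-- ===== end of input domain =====

-- B scans divisors only up to √angka (each pair (d, angka//d) is counted from its small member), instead of A's scan of all of 1..angka; objective: faster (asymptotically fewer iterations).

-- ===== PORT A =====
-- literal port of A; `int(angka/i)` is PySem.Int.truncdiv (exact here: |angka| ≤ 2^31 < 2^53)
def digitPerkalianMinimum (angka : Int) : Int :=
  let arr_faktor : List String :=
    (PySem.List.pyRange 1 (angka + 1) 1).foldl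
      (fun acc i =>
        if PySem.Int.mod angka i == 0 then
          acc ++ [("" ++ PySem.Int.toStr i) ++ PySem.Int.toStr (PySem.Int.truncdiv angka i)]
        else acc) []
  let hasil := PySem.Str.len (PySem.List.pyGetD arr_faktor 0 "")  -- arr_faktor[0]: IndexError when empty, excluded by Pre_
  (PySem.List.pyRange 0 (PySem.List.len arr_faktor) 1).foldl
    (fun hasil i =>
      if hasil > PySem.Str.len (PySem.List.pyGetD arr_faktor i "") then
        PySem.Str.len (PySem.List.pyGetD arr_faktor i "")
      else hasil) hasil

-- ===== PORT B =====
-- the `while i * i <= angka` loop of Source B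
def pvAltLoop (angka : Int) (i : Int) (best : Int) : Int :=
  if _h : i * i ≤ angka then
    pvAltLoop angka (i + 1)
      (if PySem.Int.mod angka i == 0 then
        (let l := PySem.Str.len (PySem.Int.toStr i) +
                  PySem.Str.len (PySem.Int.toStr (PySem.Int.floordiv angka i))
         if l < best then l else best)
       else best)
  else best
termination_by (angka + 1 - i).toNat
decreasing_by
  have hi : i ≤ angka := by nlinarith [sq_nonneg (i - 1), mul_self_nonneg i]
  omega

def digitPerkalianMinimum_alt (angka : Int) : Int :=
  let best := PySem.Str.len (PySem.Int.toStr 1) + PySem.Str.len (PySem.Int.toStr angka)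
  pvAltLoop angka 2 best

-- ===== PRECONDITION & SPEC =====
-- A raises IndexError (arr_faktor[0] on an empty list) for angka ≤ 0; Pre_ keeps the positive inputs.
def Pre_digitPerkalianMinimum (angka : Int) : Prop := 1 ≤ angka
instance (angka : Int) : Decidable (Pre_digitPerkalianMinimum angka) := by unfold Pre_digitPerkalianMinimum; infer_instance
def pvWitness_digitPerkalianMinimum : Int := 12

def Spec_digitPerkalianMinimum (angka : Int) (out : Int) : Prop := out = digitPerkalianMinimum_alt angka
instance (angka : Int) (out : Int) : Decidable (Spec_digitPerkalianMinimum angka out) := by unfold Spec_digitPerkalianMinimum; infer_instance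

-- ===== CLAIM (what is proved, stated in full; the proofs are below) =====
def Claim_equal_digitPerkalianMinimum : Prop := ∀ (angka : Int), Dom_digitPerkalianMinimum angka → Pre_digitPerkalianMinimum angka → Spec_digitPerkalianMinimum angka (digitPerkalianMinimum angka)

-- ===== LEMMAS AND PROOFS =====

-- digit length of d, and of the pair (d, n // d)
def pvL (d : Int) : Int := PySem.Str.len (PySem.Int.toStr d)
def pvG (n d : Int) : Int := pvL d + pvL (n / d)

-- integer square root of n, as an Int bound for `while i * i <= n`
def pvS (n : Int) : Int := (Nat.sqrt n.toNat : Int)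

lemma pv_sq_iff (n i : Int) (hn : 0 ≤ n) (hi : 0 ≤ i) : i * i ≤ n ↔ i ≤ pvS n := by
  obtain ⟨k, rfl⟩ : ∃ k : Nat, i = k := ⟨i.toNat, by omega⟩
  obtain ⟨m, rfl⟩ : ∃ m : Nat, n = m := ⟨n.toNat, by omega⟩
  unfold pvS
  rw [Int.toNat_natCast]
  constructor
  · intro h
    exact_mod_cast Nat.le_sqrt.mpr (by exact_mod_cast h)
  · intro h
    exact_mod_cast Nat.le_sqrt.mp (by exact_mod_cast h)

lemma pv_min'_insert_min (a x : Int) (s : Finset Int) :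
    (insert (min a x) s).min' (Finset.insert_nonempty _ _) =
      (insert a (insert x s)).min' (Finset.insert_nonempty _ _) := by
  apply le_antisymm
  · apply Finset.le_min'
    intro y hy
    rcases Finset.mem_insert.mp hy with rfl | hy
    · exact le_trans (Finset.min'_le _ _ (Finset.mem_insert_self _ _)) (min_le_left _ _)
    rcases Finset.mem_insert.mp hy with rfl | hy
    · exact le_trans (Finset.min'_le _ _ (Finset.mem_insert_self _ _)) (min_le_right _ _)
    · exact Finset.min'_le _ _ (Finset.mem_insert_of_mem hy)
  · apply Finset.le_min'
    intro y hy
    rcases Finset.mem_insert.mp hy with rfl | hy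
    · rcases min_choice a x with h | h <;> rw [h]
      · exact Finset.min'_le _ _ (Finset.mem_insert_self _ _)
      · exact Finset.min'_le _ _ (Finset.mem_insert_of_mem (Finset.mem_insert_self _ _))
    · exact Finset.min'_le _ _ (Finset.mem_insert_of_mem (Finset.mem_insert_of_mem hy))

lemma pv_foldl_min_eq_min' (l : List Int) (a : Int) :
    l.foldl min a = (insert a l.toFinset).min' (Finset.insert_nonempty _ _) := by
  induction l generalizing a with
  | nil => simp
  | cons x t ih =>
      simp only [List.foldl_cons, List.toFinset_cons, ih (min a x), pv_min'_insert_min]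

lemma pv_toFinset_map (l : List Int) (f : Int → Int) :
    (l.map f).toFinset = l.toFinset.image f := by
  ext a; simp

lemma pv_if_min (a x : Int) : (if a > x then x else a) = min a x := by
  rw [min_def]; split_ifs <;> omega

lemma pv_f_len (n d : Int) (hdvd : d ∣ n) :
    PySem.Str.len (("" ++ PySem.Int.toStr d) ++ PySem.Int.toStr (PySem.Int.truncdiv n d)) = pvG n d := by
  have ht : PySem.Int.truncdiv n d = n / d := Int.tdiv_eq_ediv_of_dvd hdvd
  have h0 : PySem.Str.len "" = 0 := rfl
  rw [PySem.Str.len_append, PySem.Str.len_append, ht, h0]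
  unfold pvG pvL
  ring

lemma pv_mem_dvd (n d : Int) (l : List Int) (h : d ∈ 1 :: List.filter (fun x => PySem.Int.mod n x == 0) l) : d ∣ n := by
  rcases List.mem_cons.mp h with rfl | h
  · exact one_dvd n
  · have := (List.mem_filter.mp h).2
    simpa [PySem.Int.mod_eq_zero_iff_dvd] using this

-- A computes the min of pvG over all divisors of n in [1, n]
lemma pv_A_eq (n : Int) (hn : 1 ≤ n) :
    digitPerkalianMinimum n =
      (((PySem.List.pyRange 1 (n + 1) 1).filter (fun d => PySem.Int.mod n d == 0)).map (pvG n)).foldl min (pvG n 1) := by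
  have hp1 : (PySem.Int.mod n 1 == 0) = true := by simp
  unfold digitPerkalianMinimum
  simp only [PySem.List.foldl_append_if, List.nil_append]
  rw [PySem.List.foldl_pyRange_zero_pyGetD _ ""
        (fun acc s => if acc > PySem.Str.len s then PySem.Str.len s else acc)]
  rw [List.foldl_map, List.foldl_map]
  rw [PySem.List.pyRange_one_cons (by omega : (1:Int) < n + 1)]
  simp only [List.filter_cons]
  rw [if_pos hp1, List.map_cons, PySem.List.pyGetD_zero_cons, pv_f_len n 1 (one_dvd n)]
  rw [show (1:Int) + 1 = 2 from rfl]
  apply PySem.List.foldl_congr_mem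
  intro acc d hd
  rw [pv_f_len n d (pv_mem_dvd n d _ hd), pv_if_min]

-- B computes the min of pvG over the divisors of n in [i, √n]
lemma pv_altLoop_eq (n : Int) (hn : 0 ≤ n) :
    ∀ (k : Nat) (i : Int), (n + 1 - i).toNat = k → 0 < i → ∀ b : Int,
      pvAltLoop n i b =
        (((PySem.List.pyRange i (pvS n + 1) 1).filter (fun d => PySem.Int.mod n d == 0)).map
          (pvG n)).foldl min b := by
  intro k
  induction k using Nat.strong_induction_on with
  | _ k IH =>
    intro i hk hi b
    by_cases h : i * i ≤ n
    · have hs : i ≤ pvS n := (pv_sq_iff n i hn hi.le).mp h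
      have hin : i ≤ n := by nlinarith [sq_nonneg (i - 1)]
      rw [pvAltLoop, dif_pos h,
          PySem.List.pyRange_one_cons (by omega : i < pvS n + 1), List.filter_cons]
      have hfd : PySem.Int.floordiv n i = n / i := PySem.Int.floordiv_eq_ediv_of_pos hi
      by_cases hp : (PySem.Int.mod n i == 0) = true
      · rw [if_pos hp, if_pos hp, List.map_cons, List.foldl_cons]
        simp only [hfd, pv_if_min]
        have hg : PySem.Str.len (PySem.Int.toStr i) + PySem.Str.len (PySem.Int.toStr (n / i)) =
            pvG n i := rfl
        rw [hg]
        exact IH _ (by omega) (i + 1) rfl (by omega) _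
      · rw [if_neg hp, if_neg hp]
        exact IH _ (by omega) (i + 1) rfl (by omega) _
    · have hs : ¬ i ≤ pvS n := fun hle => h ((pv_sq_iff n i hn hi.le).mpr hle)
      rw [pvAltLoop, dif_neg h, PySem.List.pyRange_one_eq_nil (by omega : pvS n + 1 ≤ i)]
      simp

lemma pv_B_eq (n : Int) (hn : 1 ≤ n) :
    digitPerkalianMinimum_alt n =
      (((PySem.List.pyRange 2 (pvS n + 1) 1).filter (fun d => PySem.Int.mod n d == 0)).map
        (pvG n)).foldl min (pvG n 1) := by
  unfold digitPerkalianMinimum_alt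
  have hg : PySem.Str.len (PySem.Int.toStr 1) + PySem.Str.len (PySem.Int.toStr n) = pvG n 1 := by
    unfold pvG pvL
    rw [Int.ediv_one]
  rw [hg]
  exact pv_altLoop_eq n (by omega) _ 2 rfl (by norm_num) _

-- the two divisor scans see the same set of pair-lengths
lemma pv_finset_eq (n : Int) (hn : 1 ≤ n) :
    insert (pvG n 1)
        (((PySem.List.pyRange 1 (n + 1) 1).filter (fun d => PySem.Int.mod n d == 0)).toFinset.image
          (pvG n)) =
      insert (pvG n 1)
        (((PySem.List.pyRange 2 (pvS n + 1) 1).filter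
              (fun d => PySem.Int.mod n d == 0)).toFinset.image (pvG n)) := by
  ext x
  simp only [Finset.mem_insert, Finset.mem_image, List.mem_toFinset, List.mem_filter,
             PySem.List.mem_pyRange_one, beq_iff_eq, PySem.Int.mod_eq_zero_iff_dvd]
  constructor
  · rintro (rfl | ⟨d, ⟨⟨h1, h2⟩, hdvd⟩, rfl⟩)
    · exact Or.inl rfl
    rcases eq_or_lt_of_le h1 with rfl | h1'
    · exact Or.inl rfl
    by_cases hsq : d * d ≤ n
    · exact Or.inr ⟨d, ⟨⟨by omega,
        by have := (pv_sq_iff n d (by omega) (by omega)).mp hsq; omega⟩, hdvd⟩, rfl⟩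
    · -- d is the large member of its pair: mirror to e = n / d ≤ √n
      have hd0 : (0:Int) < d := by omega
      have hne : n / d * d = n := Int.ediv_mul_cancel hdvd
      have he1 : 1 ≤ n / d := (Int.le_ediv_iff_mul_le hd0).mpr (by omega)
      have hedvd : n / d ∣ n := ⟨d, hne.symm⟩
      have helt : n / d < d := by nlinarith
      have hesq : n / d * (n / d) ≤ n := by nlinarith
      have hnd : n / (n / d) = d := by
        have hml := Int.mul_ediv_cancel_left (a := n / d) (b := d) (by omega)
        rw [hne] at hml
        exact hml
      have hge : pvG n (n / d) = pvG n d := by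
        unfold pvG
        rw [hnd]
        ring
      rcases eq_or_lt_of_le he1 with he | he
      · exact Or.inl (by rw [← hge, ← he])
      · exact Or.inr ⟨n / d, ⟨⟨by omega,
          by have := (pv_sq_iff n (n / d) (by omega) (by omega)).mp hesq; omega⟩, hedvd⟩, hge⟩
  · rintro (rfl | ⟨d, ⟨⟨h1, h2⟩, hdvd⟩, rfl⟩)
    · exact Or.inl rfl
    have hsq : d * d ≤ n := (pv_sq_iff n d (by omega) (by omega)).mpr (by omega)
    have hdn : d ≤ n := by nlinarith
    exact Or.inr ⟨d, ⟨⟨by omega, by omega⟩, hdvd⟩, rfl⟩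

-- ===== VERDICT (by name: the statement is the Claim_ definition above) =====
theorem digitPerkalianMinimum_spec : Claim_equal_digitPerkalianMinimum := by
  intro angka _hdom hpre
  unfold Spec_digitPerkalianMinimum
  rw [pv_A_eq angka hpre, pv_B_eq angka hpre,
      pv_foldl_min_eq_min', pv_foldl_min_eq_min',
      pv_toFinset_map, pv_toFinset_map]
  congr 1
  exact pv_finset_eq angka hpre
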